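/- GENERATED by tools/mkcompositions.py from design/units.gif.tsv (unit `DGifDecompressInput.COMPOSITION`) — do not edit.
   THE PROOF of the composition unit `DGifDecompressInput.COMPOSITION`: the 5 segments of `DGifDecompressInput` chain into its contract, by the theorem
   `Gif.Spec.DGifDecompressInput.compose` (proved next to the cut assertions). -/
import Gif.Spec.Units.DGifDecompressInput_COMPOSITION

/-- The segments of `DGifDecompressInput` compose into its contract. -/
theorem Gif.Spec.Proved.DGifDecompressInput_COMPOSITION_ok : Gif.Spec.DGifDecompressInput_COMPOSITION.Statement := by
  intro Lay _hLay μ _hμ u₀ h_DGifDecompressInput_P h_DGifDecompressInput_1 h_DGifDecompressInput_2 h_DGifDecompressInput_3 h_DGifDecompressInput_E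
  apply Gif.Spec.DGifDecompressInput.compose
  all_goals assumption
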